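-- pv_equiv track=rewrite | github.com/jyothsna-podadi/Python-basics-practice | Functions/basics/power-_of_numbers.py | powerReverse
-- ===== SOURCE A (Python) =====
-- def powerReverse(n):
--     temp=n
--     rem=0
--     while temp>0:
--         digit=temp%10
--         rem=(rem*10+digit)
--         temp//=10
--     return n**rem
-- ===== SOURCE B (Python) =====
-- def powerReverse(n):
--     # Read the decimal digits of n left to right, giving each one its
--     # positional weight in the reversed number; no modular arithmetic.
--     rem, place = 0, 1
--     if n > 0:
--         for ch in str(n):
--             rem += (ord(ch) - 48) * place
--             place *= 10
--     return n ** rem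
-- ===== Notes on version B (the rewrite author's own statement) =====
-- stated objective: alternative
-- what changed: B builds the reversed number by reading the decimal string of n left to right, adding each digit times a growing positional weight, replacing A's arithmetic while-loop of repeated modulo and floor division; same cost in the number of digits.
import Mathlib
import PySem

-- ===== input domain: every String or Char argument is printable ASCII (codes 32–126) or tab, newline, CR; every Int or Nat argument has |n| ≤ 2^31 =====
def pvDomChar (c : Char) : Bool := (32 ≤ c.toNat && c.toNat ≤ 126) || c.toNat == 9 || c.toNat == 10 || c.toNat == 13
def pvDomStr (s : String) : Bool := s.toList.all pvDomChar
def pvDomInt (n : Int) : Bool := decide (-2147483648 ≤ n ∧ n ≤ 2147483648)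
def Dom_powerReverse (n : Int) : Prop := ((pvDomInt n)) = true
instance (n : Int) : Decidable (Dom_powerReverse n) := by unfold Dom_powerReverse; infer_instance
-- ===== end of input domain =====

-- B reads the decimal string of n once, left to right, with positional weights instead of
-- A's while-loop of % and // — an alternative decomposition, not claimed faster.

-- ===== PORT A =====
-- the while loop: temp>0: digit=temp%10; rem=rem*10+digit; temp//=10
def powA (temp rem : Int) : Int :=
  if h : 0 < temp then
    powA (PySem.Int.floordiv temp 10) (rem * 10 + PySem.Int.mod temp 10)
  else rem
termination_by temp.toNat
decreasing_by
  have h10 : (0:Int) < 10 := by norm_num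
  have := PySem.Int.floordiv_eq_ediv_of_pos (a := temp) h10
  rw [this]
  omega

-- n ** rem: the loop's rem is never negative (rem starts at 0 and only grows),
-- so Python's ** is exact integer power: ported as n ^ rem.toNat.
def powerReverse (n : Int) : Int :=
  n ^ (powA n 0).toNat

-- ===== PORT B =====
-- one step of B's for-loop over str(n): rem += (ord(ch) - 48) * place; place *= 10
def revStep (s : Int × Int) (c : Char) : Int × Int :=
  (s.1 + ((c.toNat : Int) - 48) * s.2, s.2 * 10)

def powerReverse_alt (n : Int) : Int :=
  let rem : Int := if 0 < n then ((PySem.Int.toChars n).foldl revStep (0, 1)).1 else 0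
  n ^ rem.toNat

-- ===== PRECONDITION & SPEC =====
def Spec_powerReverse (n : Int) (out : Int) : Prop := out = powerReverse_alt n
instance (n : Int) (out : Int) : Decidable (Spec_powerReverse n out) := by unfold Spec_powerReverse; infer_instance

-- ===== CLAIM (what is proved, stated in full; the proofs are below) =====
def Claim_equal_powerReverse : Prop := ∀ (n : Int), Dom_powerReverse n → Spec_powerReverse n (powerReverse n)

-- ===== LEMMAS AND PROOFS =====

-- Core's toDigitsCore, for positive n and enough fuel, prints the base-10 digits MSB-first.
theorem toDigitsCore_eq (f : Nat) : ∀ (n : Nat) (ds : List Char), 0 < n → n < f →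
    Nat.toDigitsCore 10 f n ds = ((Nat.digits 10 n).map Nat.digitChar).reverse ++ ds := by
  induction f with
  | zero => intro n ds h1 h2; omega
  | succ f ih =>
    intro n ds h1 h2
    rw [Nat.digits_def' (by norm_num) h1]
    simp only [Nat.toDigitsCore, List.map_cons, List.reverse_cons]
    by_cases h : n / 10 = 0
    · simp [h]
    · rw [if_neg h, ih (n / 10) _ (Nat.pos_of_ne_zero h) (by omega)]
      simp

theorem toDigits_eq (n : Nat) (h : 0 < n) :
    Nat.toDigits 10 n = ((Nat.digits 10 n).map Nat.digitChar).reverse := by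
  have := toDigitsCore_eq (n + 1) n [] h (by omega)
  simpa [Nat.toDigits] using this

-- A's loop is the LSB-first fold over the digits of |temp|.
theorem powA_eq_foldl (m : Nat) (acc : Int) :
    powA (m : Int) acc = (Nat.digits 10 m).foldl (fun (a : Int) (d : Nat) => a * 10 + (d : Int)) acc := by
  induction m using Nat.strong_induction_on generalizing acc with
  | _ m ih =>
    rw [powA]
    by_cases h : 0 < m
    · rw [dif_pos (by exact_mod_cast h), Nat.digits_def' (by norm_num) h]
      simp only [List.foldl_cons]
      have hfd : PySem.Int.floordiv (m : Int) 10 = ((m / 10 : Nat) : Int) := by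
        exact_mod_cast PySem.Int.floordiv_natCast m 10
      have hmd : PySem.Int.mod (m : Int) 10 = ((m % 10 : Nat) : Int) := by
        exact_mod_cast PySem.Int.mod_natCast m 10
      rw [hfd, hmd]
      exact ih (m / 10) (Nat.div_lt_self h (by norm_num)) _
    · have hm : m = 0 := by omega
      subst hm
      simp [Nat.digits_zero]

-- the LSB-first fold with acc = 0 computes the value of the reversed digit list
theorem foldl_rev_value (l : List Nat) :
    l.foldl (fun (a : Int) (d : Nat) => a * 10 + (d : Int)) 0 = Nat.ofDigits (10 : Int) l.reverse := by
  induction l using List.reverseRecOn with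
  | nil => simp [Nat.ofDigits]
  | append_singleton l d ih =>
    rw [List.foldl_append, List.reverse_append]
    simp only [List.foldl_cons, List.foldl_nil, List.reverse_singleton, List.singleton_append,
      Nat.ofDigits, ih]
    ring

-- digitChar really is ASCII '0' + d for digits
theorem digitChar_toNat (d : Nat) (h : d < 10) : ((Nat.digitChar d).toNat : Int) - 48 = d := by
  interval_cases d <;> decide

-- B's fold over mapped digit chars: closed form of the (rem, place) state.
theorem foldl_revStep (l : List Nat) (h : ∀ d ∈ l, d < 10) (rem p : Int) :
    (l.map Nat.digitChar).foldl revStep (rem, p)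
      = (rem + p * Nat.ofDigits (10 : Int) l, p * 10 ^ l.length) := by
  induction l generalizing rem p with
  | nil => simp [Nat.ofDigits]
  | cons d t ih =>
    simp only [List.map_cons, List.foldl_cons, revStep]
    rw [digitChar_toNat d (h d (by simp)), ih (fun x hx => h x (by simp [hx]))]
    simp only [Nat.ofDigits, List.length_cons]
    rw [Prod.mk.injEq]
    exact ⟨by ring, by ring⟩

-- ===== VERDICT (by name: the statement is the Claim_ definition above) =====
theorem powerReverse_spec : Claim_equal_powerReverse := by
  intro n _
  unfold Spec_powerReverse powerReverse powerReverse_alt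
  by_cases hn : 0 < n
  · rw [if_pos hn]
    obtain ⟨m, rfl⟩ : ∃ m : Nat, n = (m : Int) := ⟨n.toNat, by omega⟩
    have hm : 0 < m := by exact_mod_cast hn
    have hA : powA (m : Int) 0 = Nat.ofDigits (10 : Int) (Nat.digits 10 m).reverse := by
      rw [powA_eq_foldl, foldl_rev_value]
    have htc : PySem.Int.toChars (m : Int) = ((Nat.digits 10 m).reverse).map Nat.digitChar := by
      rw [show PySem.Int.toChars (m : Int) = Nat.toDigits 10 m by
            simp [PySem.Int.toChars],
          toDigits_eq m hm, List.map_reverse]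
    have hB := foldl_revStep ((Nat.digits 10 m).reverse)
      (fun d hd => Nat.digits_lt_base (by norm_num) (List.mem_reverse.mp hd)) 0 1
    rw [htc, hB, hA]
    norm_num
  · rw [if_neg hn]
    rw [powA, dif_neg hn]
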